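-- pv_equiv track=rewrite | github.com/milotqorrolli/SocialGolferProblem_AI | backend/solver.py | is_valid_week
-- ===== SOURCE A (Python) =====
-- import itertools
--
-- def is_valid_week(week, history):
--     """Check if no pair of players repeats."""
--     all_players = [p for group in week for p in group]
--     if len(all_players) != len(set(all_players)):
--         return False
--     for group in week:
--         for a, b in itertools.combinations(group, 2):
--             if tuple(sorted((a, b))) in history:
--                 return False
--     return True
-- ===== SOURCE B (Python) =====
-- def is_valid_week(week, history):
--     """Check if no pair of players repeats: sort players and scan neighbours for
--     duplicates, then test the within-group pairs for disjointness with a hash set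
--     of the history."""
--     players = sorted(p for group in week for p in group)
--     if any(a == b for a, b in zip(players, players[1:])):
--         return False
--     forbidden = set(history)
--     return forbidden.isdisjoint(
--         (a, b) if a <= b else (b, a)
--         for group in week
--         for i, a in enumerate(group)
--         for b in group[i + 1:]
--     )
-- ===== Notes on version B (the rewrite author's own statement) =====
-- stated objective: alternative
-- what changed: Replaces A's set-cardinality duplicate test and per-pair linear membership scan of the history list by sorting the flattened players and scanning adjacent neighbours for equality, then testing hash-set disjointness between a set built once from history and the generated within-group pairs.
import Mathlib
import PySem

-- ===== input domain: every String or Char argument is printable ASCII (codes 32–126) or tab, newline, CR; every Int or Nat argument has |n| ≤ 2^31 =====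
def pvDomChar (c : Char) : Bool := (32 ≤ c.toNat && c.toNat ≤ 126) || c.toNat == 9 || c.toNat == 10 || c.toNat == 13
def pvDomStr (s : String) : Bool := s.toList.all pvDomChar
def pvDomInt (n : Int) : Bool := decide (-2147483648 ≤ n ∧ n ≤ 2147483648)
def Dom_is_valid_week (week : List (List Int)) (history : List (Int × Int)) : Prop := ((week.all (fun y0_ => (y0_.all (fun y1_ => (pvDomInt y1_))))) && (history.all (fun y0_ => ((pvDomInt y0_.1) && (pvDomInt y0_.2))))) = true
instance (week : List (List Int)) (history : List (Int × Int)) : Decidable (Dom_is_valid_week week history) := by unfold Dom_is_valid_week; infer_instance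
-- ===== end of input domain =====

-- B replaces A's set-cardinality duplicate test and per-pair scans of the history list by a
-- sort-and-scan-neighbours duplicate check plus one set-disjointness test (alternative algorithm).

-- ===== PORT A =====
-- itertools.combinations(group, 2)
def pvCombs2 (l : List Int) : List (Int × Int) :=
  match l with
  | [] => []
  | x :: xs => xs.map (fun y => (x, y)) ++ pvCombs2 xs

-- tuple(sorted((a, b))) on exactly two Ints: exact for a 2-element sort
def pvSort2 (a b : Int) : Int × Int := if a ≤ b then (a, b) else (b, a)

-- 'for group in week: for a, b in combinations(group, 2): if tuple(sorted((a,b))) in history: return False / return True'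
def pvA_pairs (week : List (List Int)) (history : List (Int × Int)) : Bool :=
  match week with
  | [] => true
  | g :: rest =>
    if (pvCombs2 g).any (fun p => history.contains (pvSort2 p.1 p.2)) then false
    else pvA_pairs rest history

def is_valid_week (week : List (List Int)) (history : List (Int × Int)) : Bool :=
  let all_players := week.flatMap (fun group => group)
  if all_players.length ≠ (PySem.Set.ofList all_players).length then false
  else pvA_pairs week history

-- ===== PORT B =====
-- '(a, b) if a <= b else (b, a)'
def pvKeyB (a b : Int) : Int × Int := if a ≤ b then (a, b) else (b, a)

-- '((a, b) if a <= b else (b, a) for group in week for i, a in enumerate(group) for b in group[i+1:])' as a list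
def pvB_pairs (week : List (List Int)) : List (Int × Int) :=
  week.flatMap (fun group =>
    (PySem.List.enumerate group).flatMap (fun ia =>
      (PySem.List.slice group (some (ia.1 + 1)) none).map (fun b => pvKeyB ia.2 b)))

def is_valid_week_alt (week : List (List Int)) (history : List (Int × Int)) : Bool :=
  let players := PySem.List.sorted (week.flatMap (fun group => group)) (fun p => p) false
  if (players.zip (PySem.List.slice players (some 1) none)).any (fun ab => ab.1 == ab.2) then false
  else
    let forbidden : PySem.Set (Int × Int) := PySem.Set.ofList history
    PySem.Set.isdisjoint forbidden (pvB_pairs week)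

-- ===== PRECONDITION & SPEC =====
def Spec_is_valid_week (week : List (List Int)) (history : List (Int × Int)) (out : Bool) : Prop := out = is_valid_week_alt week history
instance (week : List (List Int)) (history : List (Int × Int)) (out : Bool) : Decidable (Spec_is_valid_week week history out) := by unfold Spec_is_valid_week; infer_instance

-- ===== CLAIM (what is proved, stated in full; the proofs are below) =====
def Claim_equal_is_valid_week : Prop := ∀ (week : List (List Int)) (history : List (Int × Int)), Dom_is_valid_week week history → Spec_is_valid_week week history (is_valid_week week history)

-- ===== LEMMAS AND PROOFS =====

theorem pv_foldl_add_le (xs : List Int) (s : PySem.Set Int) :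
    (xs.foldl PySem.Set.add s).length ≤ s.length + xs.length := by
  induction xs generalizing s with
  | nil => simp
  | cons x xs ih =>
    simp only [List.foldl_cons]
    calc ((xs.foldl PySem.Set.add (PySem.Set.add s x)).length)
        ≤ (PySem.Set.add s x).length + xs.length := ih _
      _ ≤ s.length + (x :: xs).length := by
          simp only [PySem.Set.add, PySem.Set.contains]
          split
          · simp
          · simp
            omega

theorem pv_foldl_add_len_iff (xs : List Int) (s : PySem.Set Int) :
    (xs.foldl PySem.Set.add s).length = s.length + xs.length ↔ (xs.Nodup ∧ ∀ x ∈ xs, x ∉ s) := by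
  induction xs generalizing s with
  | nil => simp
  | cons x xs ih =>
    simp only [List.foldl_cons]
    by_cases h : x ∈ s
    · rw [PySem.Set.add_of_mem h]
      constructor
      · intro hl
        have := pv_foldl_add_le xs s
        simp at hl
        omega
      · rintro ⟨-, hall⟩
        exact absurd h (hall x (by simp))
    · rw [PySem.Set.add_of_not_mem h]
      rw [show List.length s + (x :: xs).length = (s ++ [x]).length + xs.length from by simp; omega]
      rw [ih]
      constructor
      · rintro ⟨hnd, hall⟩
        refine ⟨List.nodup_cons.mpr ⟨fun hx => ?_, hnd⟩, ?_⟩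
        · exact (hall x hx) (List.mem_append.mpr (Or.inr (List.mem_singleton.mpr rfl)))
        · intro y hy
          rcases List.mem_cons.mp hy with rfl | hy'
          · exact h
          · exact fun hys => (hall y hy') (List.mem_append.mpr (Or.inl hys))
      · rintro ⟨hnd, hall⟩
        obtain ⟨hxxs, hnd'⟩ := List.nodup_cons.mp hnd
        refine ⟨hnd', fun y hy hmem => ?_⟩
        rcases List.mem_append.mp hmem with hys | hyx
        · exact hall y (List.mem_cons_of_mem _ hy) hys
        · exact hxxs ((List.mem_singleton.mp hyx) ▸ hy)

-- A's set-cardinality test names Nodup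
theorem pv_ofList_len_iff (xs : List Int) :
    (PySem.Set.ofList xs).length = xs.length ↔ xs.Nodup := by
  rw [PySem.Set.ofList_eq_foldl]
  have := pv_foldl_add_len_iff xs []
  simp only [List.length_nil, Nat.zero_add, List.not_mem_nil, not_false_iff, imp_true_iff,
    and_true] at this
  exact this

-- B's neighbour scan on a ≤-sorted list names Nodup
theorem pv_adj_eq (l : List Int) (h : l.Pairwise (· ≤ ·)) :
    ((l.zip l.tail).any (fun ab => ab.1 == ab.2)) = !decide l.Nodup := by
  induction l with
  | nil => simp
  | cons x xs ih =>
    match xs, h with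
    | [], _ => simp
    | y :: ys, h =>
      obtain ⟨hx, hrest⟩ := List.pairwise_cons.mp h
      simp only [List.tail_cons, List.zip_cons_cons, List.any_cons]
      rw [show ((y :: ys).zip ys) = ((y :: ys).zip (y :: ys).tail) from rfl, ih hrest]
      by_cases hxy : x = y
      · subst hxy
        simp [List.nodup_cons]
      · have hx_notmem : x ∉ y :: ys := by
          intro hmem
          rcases List.mem_cons.mp hmem with rfl | hmem'
          · exact hxy rfl
          · have h1 : x ≤ y := hx y (by simp)
            have h2 : y ≤ x := (List.pairwise_cons.mp hrest).1 x hmem'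
            exact hxy (le_antisymm h1 h2)
        have : (x == y) = false := by simp [hxy]
        rw [this, Bool.false_or]
        congr 1
        simp [List.nodup_cons, hx_notmem]

-- B's generated pairs per group are A's combinations, keyed
theorem pv_enum_slice (g0 : List Int) (f : Int → Int → Int × Int) :
    ∀ (l : List Int) (s : Int), 0 ≤ s → g0.drop s.toNat = l →
    (PySem.List.enumerate l s).flatMap (fun ia =>
        (PySem.List.slice g0 (some (ia.1 + 1)) none).map (fun b => f ia.2 b))
      = (pvCombs2 l).map (fun p => f p.1 p.2) := by
  intro l
  induction l with
  | nil => intro s _ _; simp [PySem.List.enumerate, pvCombs2]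
  | cons x xs ih =>
    intro s hs hdrop
    have hdrop' : g0.drop (s + 1).toNat = xs := by
      have h1 : (s + 1).toNat = s.toNat + 1 := by omega
      rw [h1, ← List.drop_drop, hdrop]
      simp
    rw [PySem.List.enumerate_cons, List.flatMap_cons, ih (s + 1) (by omega) hdrop']
    rw [show ((s, x).1 + 1 : Int) = s + 1 from rfl,
      PySem.List.slice_from g0 (by omega : (0:Int) ≤ s + 1), hdrop']
    simp [pvCombs2]

-- A's pair loop, characterised
theorem pvA_pairs_iff (week : List (List Int)) (history : List (Int × Int)) :
    pvA_pairs week history = true ↔ ∀ g ∈ week, ∀ p ∈ pvCombs2 g, pvSort2 p.1 p.2 ∉ history := by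
  induction week with
  | nil => simp [pvA_pairs]
  | cons g rest ih =>
    simp only [pvA_pairs]
    by_cases h : (pvCombs2 g).any (fun p => history.contains (pvSort2 p.1 p.2)) = true
    · rw [if_pos h]
      simp only [List.any_eq_true] at h
      obtain ⟨p, hp, hc⟩ := h
      constructor
      · intro hf; exact absurd hf (by simp)
      · intro hall; exact absurd (by simpa using hc) (hall g (by simp) p hp)
    · rw [if_neg h, ih, List.forall_mem_cons]
      have hg : ∀ p ∈ pvCombs2 g, pvSort2 p.1 p.2 ∉ history := by
        intro p hp hmem
        exact h (List.any_eq_true.mpr ⟨p, hp, by simpa using hmem⟩)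
      exact ⟨fun hr => ⟨hg, hr⟩, fun hr => hr.2⟩

-- ===== VERDICT (by name: the statement is the Claim_ definition above) =====
theorem is_valid_week_spec : Claim_equal_is_valid_week := by
  intro week history _
  unfold Spec_is_valid_week
  have hA : is_valid_week week history
      = if ¬ (week.flatMap (fun group => group)).Nodup then false
        else pvA_pairs week history := by
    simp only [is_valid_week]
    refine if_congr ?_ rfl rfl
    exact not_congr (eq_comm.trans (pv_ofList_len_iff _))
  have hperm := PySem.List.sorted_perm (week.flatMap (fun group => group)) (fun p => p) false
  have hB : is_valid_week_alt week history
      = if ¬ (week.flatMap (fun group => group)).Nodup then false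
        else PySem.Set.isdisjoint (PySem.Set.ofList history) (pvB_pairs week) := by
    simp only [is_valid_week_alt]
    rw [PySem.List.slice_from _ (by omega : (0:Int) ≤ 1)]
    rw [show ((1:Int).toNat) = 1 from rfl, List.drop_one]
    rw [pv_adj_eq _ (by simpa using
      PySem.List.sorted_pairwise (week.flatMap (fun group => group)) (fun p => p))]
    refine if_congr ?_ rfl rfl
    rw [Bool.not_eq_true', decide_eq_false_iff_not]
    exact not_congr hperm.nodup_iff
  rw [hA, hB]
  by_cases hn : (week.flatMap (fun group => group)).Nodup
  · rw [if_neg (not_not_intro hn), if_neg (not_not_intro hn)]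
    have hgp : ∀ g : List Int,
        (PySem.List.enumerate g).flatMap (fun ia =>
          (PySem.List.slice g (some (ia.1 + 1)) none).map (fun b => pvKeyB ia.2 b))
        = (pvCombs2 g).map (fun p => pvKeyB p.1 p.2) :=
      fun g => pv_enum_slice g (fun a b => pvKeyB a b) g 0 le_rfl (by simp)
    rw [Bool.eq_iff_iff, pvA_pairs_iff, PySem.Set.isdisjoint_iff]
    constructor
    · intro hall x hx hmem
      rw [PySem.Set.mem_ofList] at hx
      simp only [pvB_pairs, hgp, List.mem_flatMap, List.mem_map] at hmem
      obtain ⟨g, hg, p, hp, rfl⟩ := hmem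
      exact hall g hg p hp hx
    · intro hd g hg p hp hmem
      refine hd (pvSort2 p.1 p.2) ((PySem.Set.mem_ofList _ _).mpr hmem) ?_
      simp only [pvB_pairs, hgp, List.mem_flatMap, List.mem_map]
      exact ⟨g, hg, p, hp, rfl⟩
  · rw [if_pos hn, if_pos hn]
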